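-- pv_equiv track=rewrite | github.com/Philipid3s/predict-strike | backend/src/services/notam_assessment.py | _infer_location_hint
-- ===== SOURCE A (Python) =====
-- NOTAM_LOCATION_HINTS: tuple[tuple[str, str, str], ...] = (
--     ("EG", "United Kingdom", "Europe"),
--     ("ED", "Germany", "Europe"),
--     ("EK", "Denmark", "Europe"),
--     ("EN", "Norway", "Europe"),
--     ("ES", "Sweden", "Europe"),
--     ("ET", "Germany", "Europe"),
--     ("LF", "France", "Europe"),
--     ("LE", "Spain", "Europe"),
--     ("LI", "Italy", "Europe"),
--     ("LK", "Czech Republic", "Europe"),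
--     ("LH", "Hungary", "Europe"),
--     ("LR", "Romania", "Europe"),
--     ("LZ", "Slovakia", "Europe"),
--     ("LL", "Israel", "Middle East"),
--     ("OJ", "Jordan", "Middle East"),
--     ("OK", "Kuwait", "Middle East"),
--     ("OT", "Qatar", "Middle East"),
--     ("OE", "Saudi Arabia", "Middle East"),
--     ("OM", "United Arab Emirates", "Middle East"),
--     ("OR", "Iraq", "Middle East"),
--     ("OI", "Iran", "Middle East"),
--     ("K", "United States", "North America"),
--     ("P", "United States", "North America"),
--     ("C", "Canada", "North America"),
--     ("RJ", "Japan", "Asia"),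
--     ("RK", "South Korea", "Asia"),
--     ("YM", "Australia", "Oceania"),
-- )
--
-- def _normalize_location(value: str | None) -> str | None:
--     if value is None:
--         return None
--     normalized = "".join(character for character in value.upper() if character.isalnum())
--     return normalized or None
--
-- def _infer_location_hint(location: str | None) -> tuple[str | None, str | None]:
--     normalized_location = _normalize_location(location)
--     if normalized_location is None:
--         return None, None
--
--     for prefix, country, region in NOTAM_LOCATION_HINTS:
--         if normalized_location.startswith(prefix):
--             return country, region
--     return None, None
-- ===== SOURCE B (Python) =====
-- # B: replaces A's flat linear scan over 27 (prefix, country, region) rows with a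
-- # two-level trie (first letter -> leaf result or second-letter table), so the
-- # lookup is a fixed two-step descent instead of a scan with startswith.
-- _TRIE = {
--     "E": {"G": ("United Kingdom", "Europe"), "D": ("Germany", "Europe"),
--           "K": ("Denmark", "Europe"), "N": ("Norway", "Europe"),
--           "S": ("Sweden", "Europe"), "T": ("Germany", "Europe")},
--     "L": {"F": ("France", "Europe"), "E": ("Spain", "Europe"),
--           "I": ("Italy", "Europe"), "K": ("Czech Republic", "Europe"),
--           "H": ("Hungary", "Europe"), "R": ("Romania", "Europe"),
--           "Z": ("Slovakia", "Europe"), "L": ("Israel", "Middle East")},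
--     "O": {"J": ("Jordan", "Middle East"), "K": ("Kuwait", "Middle East"),
--           "T": ("Qatar", "Middle East"), "E": ("Saudi Arabia", "Middle East"),
--           "M": ("United Arab Emirates", "Middle East"), "R": ("Iraq", "Middle East"),
--           "I": ("Iran", "Middle East")},
--     "R": {"J": ("Japan", "Asia"), "K": ("South Korea", "Asia")},
--     "Y": {"M": ("Australia", "Oceania")},
--     "K": ("United States", "North America"),
--     "P": ("United States", "North America"),
--     "C": ("Canada", "North America"),
-- }
--
-- def _infer_location_hint(location):
--     if location is None:
--         return None, None
--     normalized = "".join(ch for ch in location.upper() if ch.isalnum())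
--     if not normalized:
--         return None, None
--     node = _TRIE.get(normalized[0])
--     if node is None:
--         return None, None
--     if isinstance(node, tuple):
--         return node
--     if len(normalized) < 2:
--         return None, None
--     hit = node.get(normalized[1])
--     if hit is None:
--         return None, None
--     return hit
-- ===== Notes on version B (the rewrite author's own statement) =====
-- stated objective: alternative
-- what changed: Replaces A's flat linear scan of 27 prefix rows tested with startswith by a two-level character trie (first letter maps to either a leaf result or a second-letter table), so the answer is found by a fixed two-step descent on the first two normalized characters; correct because the prefix set is prefix-free.
import Mathlib
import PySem

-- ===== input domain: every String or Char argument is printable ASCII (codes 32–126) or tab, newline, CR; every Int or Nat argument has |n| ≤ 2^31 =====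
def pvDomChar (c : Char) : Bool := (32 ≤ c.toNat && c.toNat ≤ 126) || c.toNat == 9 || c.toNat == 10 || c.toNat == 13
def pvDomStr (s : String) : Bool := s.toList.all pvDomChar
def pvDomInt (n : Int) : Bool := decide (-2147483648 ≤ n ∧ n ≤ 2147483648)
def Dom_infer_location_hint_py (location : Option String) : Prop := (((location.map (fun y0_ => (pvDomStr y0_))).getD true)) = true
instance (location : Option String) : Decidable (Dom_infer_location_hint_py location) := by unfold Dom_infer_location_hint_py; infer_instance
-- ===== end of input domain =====

-- B replaces A's flat linear scan of the 27 prefix rows with a two-level character trie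
-- (first letter -> leaf result or second-letter table); alternative structure, return value proved equal.


-- ===== PORT A =====
-- NOTAM_LOCATION_HINTS (prefixes as List Char, the PySem string representation)
def pvHints : List (List Char × String × String) :=
  [ (['E','G'], "United Kingdom", "Europe"), (['E','D'], "Germany", "Europe"),
    (['E','K'], "Denmark", "Europe"), (['E','N'], "Norway", "Europe"),
    (['E','S'], "Sweden", "Europe"), (['E','T'], "Germany", "Europe"),
    (['L','F'], "France", "Europe"), (['L','E'], "Spain", "Europe"),
    (['L','I'], "Italy", "Europe"), (['L','K'], "Czech Republic", "Europe"),
    (['L','H'], "Hungary", "Europe"), (['L','R'], "Romania", "Europe"),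
    (['L','Z'], "Slovakia", "Europe"), (['L','L'], "Israel", "Middle East"),
    (['O','J'], "Jordan", "Middle East"), (['O','K'], "Kuwait", "Middle East"),
    (['O','T'], "Qatar", "Middle East"), (['O','E'], "Saudi Arabia", "Middle East"),
    (['O','M'], "United Arab Emirates", "Middle East"), (['O','R'], "Iraq", "Middle East"),
    (['O','I'], "Iran", "Middle East"), (['K'], "United States", "North America"),
    (['P'], "United States", "North America"), (['C'], "Canada", "North America"),
    (['R','J'], "Japan", "Asia"), (['R','K'], "South Korea", "Asia"),
    (['Y','M'], "Australia", "Oceania") ]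

-- _normalize_location: upper-case, keep alphanumeric chars, empty means None
def pvNormalize (value : Option String) : Option (List Char) :=
  match value with
  | none => none
  | some v =>
    let normalized := (PySem.Chars.upper v.toList).filter PySem.Chars.isalnum
    if normalized = [] then none else some normalized

-- the 'for prefix, country, region in NOTAM_LOCATION_HINTS' loop with its early return
def pvScan (n : List Char) : List (List Char × String × String) → Option String × Option String
  | [] => (none, none)
  | (p, c, r) :: rest => if PySem.Chars.startswith n p then (some c, some r) else pvScan n rest

def infer_location_hint_py (location : Option String) : Option String × Option String :=
  match pvNormalize location with
  | none => (none, none)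
  | some n => pvScan n pvHints

-- ===== PORT B =====
-- a trie node: either a leaf result (1-char prefix) or a second-letter table (2-char prefixes)
inductive PvNode where
  | leaf : String → String → PvNode
  | table : PySem.Dict Char (String × String) → PvNode
deriving Repr

-- _TRIE: first letter -> node
def pvTrie : PySem.Dict Char PvNode :=
  ⟨[ ('E', .table ⟨[('G', ("United Kingdom", "Europe")), ('D', ("Germany", "Europe")),
                    ('K', ("Denmark", "Europe")), ('N', ("Norway", "Europe")),
                    ('S', ("Sweden", "Europe")), ('T', ("Germany", "Europe"))]⟩),
     ('L', .table ⟨[('F', ("France", "Europe")), ('E', ("Spain", "Europe")),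
                    ('I', ("Italy", "Europe")), ('K', ("Czech Republic", "Europe")),
                    ('H', ("Hungary", "Europe")), ('R', ("Romania", "Europe")),
                    ('Z', ("Slovakia", "Europe")), ('L', ("Israel", "Middle East"))]⟩),
     ('O', .table ⟨[('J', ("Jordan", "Middle East")), ('K', ("Kuwait", "Middle East")),
                    ('T', ("Qatar", "Middle East")), ('E', ("Saudi Arabia", "Middle East")),
                    ('M', ("United Arab Emirates", "Middle East")), ('R', ("Iraq", "Middle East")),
                    ('I', ("Iran", "Middle East"))]⟩),
     ('R', .table ⟨[('J', ("Japan", "Asia")), ('K', ("South Korea", "Asia"))]⟩),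
     ('Y', .table ⟨[('M', ("Australia", "Oceania"))]⟩),
     ('K', .leaf "United States" "North America"),
     ('P', .leaf "United States" "North America"),
     ('C', .leaf "Canada" "North America") ]⟩

def infer_location_hint_py_alt (location : Option String) : Option String × Option String :=
  match location with
  | none => (none, none)
  | some v =>
    match (PySem.Chars.upper v.toList).filter PySem.Chars.isalnum with
    | [] => (none, none)
    | c0 :: rest =>
      match PySem.Dict.get? pvTrie c0 with
      | none => (none, none)
      | some (.leaf c r) => (some c, some r)
      | some (.table t) =>
        match rest with
        | [] => (none, none)
        | c1 :: _ =>
          match PySem.Dict.get? t c1 with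
          | none => (none, none)
          | some (c, r) => (some c, some r)

-- ===== PRECONDITION & SPEC =====
def Spec_infer_location_hint_py (location : Option String) (out : Option String × Option String) : Prop := out = infer_location_hint_py_alt location
instance (location : Option String) (out : Option String × Option String) : Decidable (Spec_infer_location_hint_py location out) := by unfold Spec_infer_location_hint_py; infer_instance

-- ===== CLAIM =====
def Claim_equal_infer_location_hint_py : Prop := ∀ (location : Option String), Dom_infer_location_hint_py location → Spec_infer_location_hint_py location (infer_location_hint_py location)

-- ===== LEMMAS AND PROOFS =====

-- helper: the pure lookup part of B, on an already-normalized nonempty char list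
def pvTrieLookup (n : List Char) : Option String × Option String :=
  match n with
  | [] => (none, none)
  | c0 :: rest =>
    match PySem.Dict.get? pvTrie c0 with
    | none => (none, none)
    | some (.leaf c r) => (some c, some r)
    | some (.table t) =>
      match rest with
      | [] => (none, none)
      | c1 :: _ =>
        match PySem.Dict.get? t c1 with
        | none => (none, none)
        | some (c, r) => (some c, some r)

-- the flat scan agrees with the trie descent on every char list
set_option maxHeartbeats 1600000 in
theorem pvScan_eq_trie (n : List Char) : pvScan n pvHints = pvTrieLookup n := by
  match n with
  | [] => decide
  | [c1] =>
    by_cases hK : c1 = 'K'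
    · subst hK; rfl
    by_cases hP : c1 = 'P'
    · subst hP; rfl
    by_cases hC : c1 = 'C'
    · subst hC; rfl
    by_cases hE : c1 = 'E'
    · subst hE; rfl
    by_cases hL : c1 = 'L'
    · subst hL; rfl
    by_cases hO : c1 = 'O'
    · subst hO; rfl
    by_cases hR : c1 = 'R'
    · subst hR; rfl
    by_cases hY : c1 = 'Y'
    · subst hY; rfl
    simp [pvScan, pvHints, pvTrieLookup, pvTrie, PySem.Dict.get?, PySem.Chars.startswith,
      Bool.beq_eq_decide_eq, List.find?, List.cons.injEq,
      Ne.symm hK, Ne.symm hP, Ne.symm hC, Ne.symm hE, Ne.symm hL, Ne.symm hO, Ne.symm hR, Ne.symm hY]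
  | c1 :: c2 :: rest =>
    by_cases hE : c1 = 'E'
    · subst hE
      by_cases h1 : c2 = 'G'; · subst h1; rfl
      by_cases h2 : c2 = 'D'; · subst h2; rfl
      by_cases h3 : c2 = 'K'; · subst h3; rfl
      by_cases h4 : c2 = 'N'; · subst h4; rfl
      by_cases h5 : c2 = 'S'; · subst h5; rfl
      by_cases h6 : c2 = 'T'; · subst h6; rfl
      simp [pvScan, pvHints, pvTrieLookup, pvTrie, PySem.Dict.get?, PySem.Chars.startswith,
        Bool.beq_eq_decide_eq, List.find?, List.cons.injEq,
        Ne.symm h1, Ne.symm h2, Ne.symm h3, Ne.symm h4, Ne.symm h5, Ne.symm h6]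
    by_cases hL : c1 = 'L'
    · subst hL
      by_cases h1 : c2 = 'F'; · subst h1; rfl
      by_cases h2 : c2 = 'E'; · subst h2; rfl
      by_cases h3 : c2 = 'I'; · subst h3; rfl
      by_cases h4 : c2 = 'K'; · subst h4; rfl
      by_cases h5 : c2 = 'H'; · subst h5; rfl
      by_cases h6 : c2 = 'R'; · subst h6; rfl
      by_cases h7 : c2 = 'Z'; · subst h7; rfl
      by_cases h8 : c2 = 'L'; · subst h8; rfl
      simp [pvScan, pvHints, pvTrieLookup, pvTrie, PySem.Dict.get?, PySem.Chars.startswith,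
        Bool.beq_eq_decide_eq, List.find?, List.cons.injEq,
        Ne.symm h1, Ne.symm h2, Ne.symm h3, Ne.symm h4, Ne.symm h5, Ne.symm h6, Ne.symm h7, Ne.symm h8]
    by_cases hO : c1 = 'O'
    · subst hO
      by_cases h1 : c2 = 'J'; · subst h1; rfl
      by_cases h2 : c2 = 'K'; · subst h2; rfl
      by_cases h3 : c2 = 'T'; · subst h3; rfl
      by_cases h4 : c2 = 'E'; · subst h4; rfl
      by_cases h5 : c2 = 'M'; · subst h5; rfl
      by_cases h6 : c2 = 'R'; · subst h6; rfl
      by_cases h7 : c2 = 'I'; · subst h7; rfl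
      simp [pvScan, pvHints, pvTrieLookup, pvTrie, PySem.Dict.get?, PySem.Chars.startswith,
        Bool.beq_eq_decide_eq, List.find?, List.cons.injEq,
        Ne.symm h1, Ne.symm h2, Ne.symm h3, Ne.symm h4, Ne.symm h5, Ne.symm h6, Ne.symm h7]
    by_cases hR : c1 = 'R'
    · subst hR
      by_cases h1 : c2 = 'J'; · subst h1; rfl
      by_cases h2 : c2 = 'K'; · subst h2; rfl
      simp [pvScan, pvHints, pvTrieLookup, pvTrie, PySem.Dict.get?, PySem.Chars.startswith,
        Bool.beq_eq_decide_eq, List.find?, List.cons.injEq, Ne.symm h1, Ne.symm h2]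
    by_cases hY : c1 = 'Y'
    · subst hY
      by_cases h1 : c2 = 'M'; · subst h1; rfl
      simp [pvScan, pvHints, pvTrieLookup, pvTrie, PySem.Dict.get?, PySem.Chars.startswith,
        Bool.beq_eq_decide_eq, List.find?, List.cons.injEq, Ne.symm h1]
    by_cases hK : c1 = 'K'
    · subst hK; rfl
    by_cases hP : c1 = 'P'
    · subst hP; rfl
    by_cases hC : c1 = 'C'
    · subst hC; rfl
    simp [pvScan, pvHints, pvTrieLookup, pvTrie, PySem.Dict.get?, PySem.Chars.startswith,
      Bool.beq_eq_decide_eq, List.find?, List.cons.injEq,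
      Ne.symm hE, Ne.symm hL, Ne.symm hO, Ne.symm hR, Ne.symm hY, Ne.symm hK, Ne.symm hP, Ne.symm hC]

-- ===== VERDICT =====
theorem infer_location_hint_py_spec : Claim_equal_infer_location_hint_py := by
  intro location _
  unfold Spec_infer_location_hint_py infer_location_hint_py infer_location_hint_py_alt pvNormalize
  cases location with
  | none => rfl
  | some v =>
    cases hn : (PySem.Chars.upper v.toList).filter PySem.Chars.isalnum with
    | nil => simp [hn]
    | cons c0 rest =>
      simp only [hn, reduceCtorEq, if_false, if_neg (List.cons_ne_nil c0 rest)]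
      exact pvScan_eq_trie (c0 :: rest)
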